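-- pv_equiv track=rewrite | github.com/ChuntaoLu/Cracking-The-Coding-Interview | ch11_sorting_and_searching/7_longest_asc_sequence.py | asc_sequences
-- ===== SOURCE A (Python) =====
-- def asc_sequences(array):
--     """Returns a list of longest ascending sequences that are ended with
--     each element in the array."""
--     if not array:
--         return []
--     seqs = asc_sequences(array[:-1])
--     options = [i for i in seqs if i[-1][1] < array[-1][1]]
--     if options:
--         seqs.append(max(options, key=len) + [array[-1]])
--     else:
--         seqs.append([array[-1]])
--     return seqs
-- ===== SOURCE B (Python) =====
-- def asc_sequences(array):
--     """Returns a list of longest ascending sequences that are ended with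
--     each element in the array."""
--     seqs = []
--     for elem in array:
--         best = None
--         for s in seqs:
--             if s[-1][1] < elem[1] and (best is None or len(s) > len(best)):
--                 best = s
--         seqs.append(best + [elem] if best is not None else [elem])
--     return seqs
-- ===== Notes on version B (the rewrite author's own statement) =====
-- stated objective: idiomatic
-- what changed: Replaced the recursion over array[:-1] (which re-slices the list at every level) by a single forward loop, and replaced the comprehension-plus-max(key=len) pass by one running-best scan over the accumulated sequences.
import Mathlib
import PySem

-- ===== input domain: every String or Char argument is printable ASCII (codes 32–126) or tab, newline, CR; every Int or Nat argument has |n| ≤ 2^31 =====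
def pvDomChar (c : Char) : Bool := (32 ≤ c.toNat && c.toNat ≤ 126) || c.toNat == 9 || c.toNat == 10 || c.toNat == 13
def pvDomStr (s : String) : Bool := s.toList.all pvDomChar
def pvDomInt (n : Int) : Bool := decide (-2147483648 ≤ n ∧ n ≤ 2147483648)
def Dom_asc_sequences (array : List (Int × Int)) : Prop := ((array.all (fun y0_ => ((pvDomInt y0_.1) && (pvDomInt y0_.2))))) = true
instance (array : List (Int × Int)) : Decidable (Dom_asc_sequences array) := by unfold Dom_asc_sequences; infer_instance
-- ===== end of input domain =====

-- B replaces A's recursion over array[:-1] by one forward loop and the comprehension + max(key=len)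
-- by a single running-best scan; equal return values (A mutates no argument).

-- ===== PORT A =====
def asc_sequences (array : List (Int × Int)) : List (List (Int × Int)) :=
  if h : array = [] then []
  else
    let seqs := asc_sequences (PySem.List.slice array none (some (-1)))
    let last := (PySem.List.pyGet? array (-1)).getD (0, 0)
    let options := seqs.filter (fun i => decide (((PySem.List.pyGet? i (-1)).getD (0, 0)).2 < last.2))
    match PySem.List.max? options (fun s => s.length) with
    | some m => seqs ++ [m ++ [last]]
    | none => seqs ++ [[last]]
termination_by array.length
decreasing_by
  have hlen : array.length ≠ 0 := fun hn => h (List.length_eq_zero_iff.mp hn)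
  simp only [PySem.List.slice_to_neg_one, List.length_dropLast]
  omega

-- ===== PORT B =====
def ascStep (seqs : List (List (Int × Int))) (elem : Int × Int) : List (List (Int × Int)) :=
  match seqs.foldl
    (fun best s =>
      if decide (((PySem.List.pyGet? s (-1)).getD (0, 0)).2 < elem.2)
         && best.all (fun b => decide (b.length < s.length))
      then some s else best)
    (none : Option (List (Int × Int))) with
  | some b => seqs ++ [b ++ [elem]]
  | none => seqs ++ [[elem]]

def asc_sequences_alt (array : List (Int × Int)) : List (List (Int × Int)) :=
  array.foldl ascStep []

-- ===== PRECONDITION & SPEC =====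
def Spec_asc_sequences (array : List (Int × Int)) (out : List (List (Int × Int))) : Prop := out = asc_sequences_alt array
instance (array : List (Int × Int)) (out : List (List (Int × Int))) : Decidable (Spec_asc_sequences array out) := by unfold Spec_asc_sequences; infer_instance

-- ===== CLAIM (what is proved, stated in full; the proofs are below) =====
def Claim_equal_asc_sequences : Prop := ∀ (array : List (Int × Int)), Dom_asc_sequences array → Spec_asc_sequences array (asc_sequences array)

-- ===== LEMMAS AND PROOFS =====

-- xs[-1] of a list ending in x is x
theorem pyGet_append_neg_one (ys : List (Int × Int)) (x : Int × Int) :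
    PySem.List.pyGet? (ys ++ [x]) (-1) = some x := by
  simp [PySem.List.pyGet?, PySem.List.pyIdx?]

-- B's running-best scan computes max(options, key=len) over the filtered sequences
theorem best_eq_max? (elem : Int × Int) (l : List (List (Int × Int))) :
    l.foldl
      (fun best s =>
        if decide (((PySem.List.pyGet? s (-1)).getD (0, 0)).2 < elem.2)
           && best.all (fun b => decide (b.length < s.length))
        then some s else best)
      (none : Option (List (Int × Int)))
    = PySem.List.max?
        (l.filter (fun i => decide (((PySem.List.pyGet? i (-1)).getD (0, 0)).2 < elem.2)))
        (fun s => s.length) := by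
  unfold PySem.List.max?
  rw [List.foldl_filter]
  apply PySem.List.foldl_congr_mem
  intro best s _
  by_cases hp : (((PySem.List.pyGet? s (-1)).getD (0, 0)).2 < elem.2)
  · cases best with
    | none => simp [hp]
    | some b =>
      by_cases hl : b.length < s.length
      · simp [hp, hl]
      · simp [hp, hl]
  · cases best <;> simp [hp]

theorem asc_eq_alt (array : List (Int × Int)) :
    asc_sequences array = asc_sequences_alt array := by
  induction array using List.reverseRecOn with
  | nil => simp [asc_sequences, asc_sequences_alt]
  | append_singleton ys x ih =>
    rw [asc_sequences]
    have hne : ys ++ [x] ≠ [] := by simp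
    simp only [dif_neg hne, PySem.List.slice_to_neg_one, List.dropLast_concat,
      pyGet_append_neg_one, Option.getD_some, ih]
    unfold asc_sequences_alt
    rw [List.foldl_append, List.foldl_cons, List.foldl_nil]
    unfold ascStep
    rw [best_eq_max?]

-- ===== VERDICT (by name: the statement is the Claim_ definition above) =====
theorem asc_sequences_spec : Claim_equal_asc_sequences := by
  intro array _
  unfold Spec_asc_sequences
  exact asc_eq_alt array
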